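-- pv_equiv track=rewrite | github.com/comsec-group/mucfi | automation/common/util_hier_paths.py | escaped_verilog_hierarchy_path_split
-- ===== SOURCE A (Python) =====
-- def escaped_verilog_hierarchy_path_split(signal_path : str):
--   """
--   Splits a hierarchical signal path on the non escaped dots.
--   Returns: List of the parts of the path
--   """
--   ret = []
--   part = ""
--   last_c = ""
--   in_escaped_name = False
--   for c in signal_path:
--     if not in_escaped_name and c == ".":
--       if part != "":
--         ret.append(part)
--       part = ""
--     elif c == "\\":
--       if not in_escaped_name and last_c not in ("", "."):
--         raise Exception(f"ERROR: found a \\ character in the middle of a path name: {signal_path}")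
--       in_escaped_name = True
--       part += c
--     elif c == " ":
--       if in_escaped_name:
--         in_escaped_name = False
--         part += c
--         if part != " ":
--           ret.append(part)
--         part = ""
--       else:
--         raise Exception(f"ERROR: Found an unexpected space in the signal path: {signal_path}")
--     else:
--       part += c
--     last_c = c
--   if part.strip(" ") != "":
--     ret.append(part)
--   return ret
-- ===== SOURCE B (Python) =====
-- def escaped_verilog_hierarchy_path_split(signal_path : str):
--   """
--   Splits a hierarchical signal path on the non escaped dots.
--   Tokenizer: consumes whole segments at once (escaped names up to their
--   terminating space via find, plain names up to the next dot) instead of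
--   a per-character state machine.
--   """
--   ret = []
--   rest = signal_path
--   boundary = True  # at the start of the path or right after a '.'
--   while rest:
--     c = rest[0]
--     if c == ".":
--       rest = rest[1:]
--       boundary = True
--     elif c == "\\":
--       if not boundary:
--         raise Exception(f"ERROR: found a \\ character in the middle of a path name: {signal_path}")
--       k = rest.find(" ")
--       if k == -1:
--         ret.append(rest)
--         rest = ""
--       else:
--         ret.append(rest[:k + 1])
--         rest = rest[k + 1:]
--       boundary = False
--     elif c == " ":
--       raise Exception(f"ERROR: Found an unexpected space in the signal path: {signal_path}")
--     else:
--       k = 0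
--       while k < len(rest) and rest[k] not in ". \\":
--         k += 1
--       if k < len(rest) and rest[k] == "\\":
--         raise Exception(f"ERROR: found a \\ character in the middle of a path name: {signal_path}")
--       if k < len(rest) and rest[k] == " ":
--         raise Exception(f"ERROR: Found an unexpected space in the signal path: {signal_path}")
--       ret.append(rest[:k])
--       rest = rest[k:]
--       boundary = False
--   return ret
-- ===== Notes on version B (the rewrite author's own statement) =====
-- stated objective: alternative
-- what changed: A's per-character state machine (part buffer, last_c, in_escaped_name flag) is replaced by a segment-at-a-time tokenizer: at each boundary it slices a whole escaped name up to its terminating space with str.find, or a whole plain name up to the next dot with one inner scan, emitting each slice directly.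
import Mathlib
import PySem

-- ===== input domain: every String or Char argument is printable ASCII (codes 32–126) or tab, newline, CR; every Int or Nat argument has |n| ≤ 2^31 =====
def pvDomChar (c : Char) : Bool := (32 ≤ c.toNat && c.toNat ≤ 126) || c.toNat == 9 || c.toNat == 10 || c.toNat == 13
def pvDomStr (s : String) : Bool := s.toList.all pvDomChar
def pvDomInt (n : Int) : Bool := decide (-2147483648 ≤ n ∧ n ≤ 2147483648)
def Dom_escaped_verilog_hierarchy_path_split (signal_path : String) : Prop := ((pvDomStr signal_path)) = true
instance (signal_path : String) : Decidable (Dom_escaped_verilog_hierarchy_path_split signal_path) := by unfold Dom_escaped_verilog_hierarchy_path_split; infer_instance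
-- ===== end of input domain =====

-- B re-implements the per-character state machine as a segment-at-a-time tokenizer
-- (escaped name up to its space via find, plain name up to the next dot); same
-- return value on every input where A returns (Pre_ excludes exactly A's raises).

-- ===== PORT A =====
-- A's for-loop: state (ret, part, last_c, in_escaped_name); a `raise` becomes `none`.
def pvA_loop : List Char → List String → List Char → Option Char → Bool → Option (List String)
  | [], ret, part, _, _ =>
      -- trailing `if part.strip(" ") != "": ret.append(part)`
      some (if PySem.Str.stripChars (String.ofList part) " " ≠ "" then ret ++ [String.ofList part] else ret)
  | c :: cs, ret, part, last, esc =>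
      if esc = false ∧ c = '.' then
        pvA_loop cs (if String.ofList part ≠ "" then ret ++ [String.ofList part] else ret) [] (some c) esc
      else if c = '\\' then
        if esc = false ∧ last ≠ none ∧ last ≠ some '.' then none
        else pvA_loop cs ret (part ++ [c]) (some c) true
      else if c = ' ' then
        if esc = true then
          pvA_loop cs (if String.ofList (part ++ [c]) ≠ " " then ret ++ [String.ofList (part ++ [c])] else ret) [] (some c) false
        else none
      else pvA_loop cs ret (part ++ [c]) (some c) esc

def escaped_verilog_hierarchy_path_split (signal_path : String) : List String :=
  (pvA_loop signal_path.toList [] [] none false).getD []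

-- ===== PORT B =====
-- `rest.find(" ")` of Source B, as an index into the char list (none = -1)
def pvB_findSpace : List Char → Option Nat
  | [] => none
  | c :: r => if c = ' ' then some 0 else (pvB_findSpace r).map (· + 1)

-- Source B's inner `while k < len(rest) and rest[k] not in ". \\": k += 1`
def pvB_scanPlain : List Char → Nat
  | [] => 0
  | c :: r => if c = '.' ∨ c = ' ' ∨ c = '\\' then 0 else pvB_scanPlain r + 1

-- Source B's outer `while rest:` over (rest, boundary, ret); a `raise` becomes `none`.
-- Source B's outer `while rest:` over (rest, boundary, ret); a `raise` becomes `none`.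
def pvB_loop : List Char → Bool → List String → Option (List String)
  | [], _, ret => some ret
  | c :: r, bdy, ret =>
      if hdot : c = '.' then pvB_loop r true ret
      else if hb : c = '\\' then
        if bdy = false then none
        else
          match pvB_findSpace (c :: r) with
          | none => pvB_loop [] false (ret ++ [String.ofList (c :: r)])
          | some k => pvB_loop ((c :: r).drop (k + 1)) false (ret ++ [String.ofList ((c :: r).take (k + 1))])
      else if hs : c = ' ' then none
      else
        let k := pvB_scanPlain (c :: r)
        if k < (c :: r).length ∧ (c :: r)[k]? = some '\\' then none
        else if k < (c :: r).length ∧ (c :: r)[k]? = some ' ' then none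
        else pvB_loop ((c :: r).drop k) false (ret ++ [String.ofList ((c :: r).take k)])
  termination_by l _ _ => l.length
  decreasing_by
  · simp
  · simp
  · simp [List.length_drop]
  · have hk : pvB_scanPlain (c :: r) = pvB_scanPlain r + 1 := by
      simp only [pvB_scanPlain]
      rw [if_neg (by push Not; exact ⟨hdot, hs, hb⟩)]
    simp only [List.length_drop, List.length_cons]
    omega

def escaped_verilog_hierarchy_path_split_alt (signal_path : String) : List String :=
  (pvB_loop signal_path.toList true []).getD []

-- ===== PRECONDITION & SPEC =====
-- The validity DFA for A's raises, as a grammar over the characters: state B = at a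
-- segment boundary (start or after '.'), P = inside/after a plain name (a '\' or ' '
-- here raises), E = inside an escaped name (ends at the first ' ').
inductive PvSt : Type
  | B | P | E
deriving DecidableEq

def pvOk : List Char → PvSt → Bool
  | [], _ => true
  | c :: r, .B => if c = '.' then pvOk r .B else if c = '\\' then pvOk r .E
                  else if c = ' ' then false else pvOk r .P
  | c :: r, .P => if c = '.' then pvOk r .B else if c = '\\' then false
                  else if c = ' ' then false else pvOk r .P
  | c :: r, .E => if c = ' ' then pvOk r .P else pvOk r .E

-- Pre_ = exactly the inputs on which A returns normally (A raises on a '\' not at a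
-- segment boundary and on a ' ' outside an escaped name; pvOk is that language).
def Pre_escaped_verilog_hierarchy_path_split (signal_path : String) : Prop :=
  pvOk signal_path.toList PvSt.B = true

instance (signal_path : String) : Decidable (Pre_escaped_verilog_hierarchy_path_split signal_path) := by
  unfold Pre_escaped_verilog_hierarchy_path_split; infer_instance

def pvWitness_escaped_verilog_hierarchy_path_split : String := "top.\\m[0] .sig"

def Spec_escaped_verilog_hierarchy_path_split (signal_path : String) (out : List String) : Prop := out = escaped_verilog_hierarchy_path_split_alt signal_path
instance (signal_path : String) (out : List String) : Decidable (Spec_escaped_verilog_hierarchy_path_split signal_path out) := by unfold Spec_escaped_verilog_hierarchy_path_split; infer_instance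

-- ===== CLAIM (what is proved, stated in full; the proofs are below) =====
def Claim_equal_escaped_verilog_hierarchy_path_split : Prop := ∀ (signal_path : String), Dom_escaped_verilog_hierarchy_path_split signal_path → Pre_escaped_verilog_hierarchy_path_split signal_path → Spec_escaped_verilog_hierarchy_path_split signal_path (escaped_verilog_hierarchy_path_split signal_path)

-- ===== LEMMAS AND PROOFS =====

theorem pv_ofList_eq_iff (l : List Char) (s : String) : String.ofList l = s ↔ l = s.toList := by
  constructor
  · intro h; rw [← h, String.toList_ofList]
  · intro h; rw [h, String.ofList_toList]

-- stripChars with " " is nonempty as soon as some character is not a space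
theorem pv_strip_ne (l : List Char) (c : Char) (hc : c ∈ l) (hcs : c ≠ ' ') :
    PySem.Str.stripChars (String.ofList l) " " ≠ "" := by
  intro hcontra
  have h1 : PySem.Chars.stripChars l (" ".toList) = [] := by
    have h2 := congrArg String.toList hcontra
    simpa [PySem.Str.toList_stripChars, String.toList_ofList] using h2
  have h3 : ∀ x ∈ List.dropWhile (fun c => (" ".toList).contains c) l,
      (" ".toList).contains x = true := by
    have h4 : List.dropWhile (fun c => (" ".toList).contains c)
        ((List.dropWhile (fun c => (" ".toList).contains c) l).reverse) = [] := by
      simpa [PySem.Chars.stripChars] using h1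
    intro x hx
    exact List.dropWhile_eq_nil_iff.mp h4 x (List.mem_reverse.mpr hx)
  have h5 : (" ".toList).contains c = true := by
    rcases List.mem_append.mp
        (by rw [List.takeWhile_append_dropWhile
          (p := fun c => (" ".toList).contains c)]; exact hc) with h | h
    · exact List.mem_takeWhile_imp h
    · exact h3 c h
  simp at h5
  exact hcs h5

-- A walks through a run of plain characters by appending them to `part`
theorem pv_A_plain_walk (seg : List Char) (h : ∀ c ∈ seg, ¬(c = '.' ∨ c = ' ' ∨ c = '\\')) :
    ∀ (rest2 : List Char) (ret : List String) (part : List Char) (last : Option Char),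
    pvA_loop (seg ++ rest2) ret part last false
      = pvA_loop rest2 ret (part ++ seg) (seg.foldl (fun _ c => some c) last) false := by
  induction seg with
  | nil => intro rest2 ret part last; simp
  | cons c seg ih =>
    intro rest2 ret part last
    have hc := h c (by simp)
    push Not at hc
    rw [List.cons_append]
    simp only [pvA_loop]
    rw [if_neg (by simp [hc.1]), if_neg hc.2.2, if_neg hc.2.1]
    rw [ih (fun x hx => h x (List.mem_cons_of_mem _ hx))]
    simp

-- in escaped mode A appends every non-space character (dots and backslashes included)
theorem pv_A_esc_walk (body : List Char) (h : ∀ c ∈ body, c ≠ ' ') :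
    ∀ (rest2 : List Char) (ret : List String) (part : List Char) (last : Option Char),
    pvA_loop (body ++ rest2) ret part last true
      = pvA_loop rest2 ret (part ++ body) (body.foldl (fun _ c => some c) last) true := by
  induction body with
  | nil => intro rest2 ret part last; simp
  | cons c body ih =>
    intro rest2 ret part last
    have hc := h c (by simp)
    rw [List.cons_append]
    simp only [pvA_loop]
    rw [if_neg (by simp)]
    by_cases hbs : c = '\\'
    · rw [if_pos hbs, if_neg (by simp)]
      rw [ih (fun x hx => h x (List.mem_cons_of_mem _ hx))]
      simp
    · rw [if_neg hbs, if_neg hc]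
      rw [ih (fun x hx => h x (List.mem_cons_of_mem _ hx))]
      simp

theorem pv_findSpace_none (l : List Char) (h : pvB_findSpace l = none) : ∀ c ∈ l, c ≠ ' ' := by
  induction l with
  | nil => simp
  | cons c r ih =>
    by_cases hc : c = ' '
    · simp [pvB_findSpace, hc] at h
    · simp only [pvB_findSpace, if_neg hc, Option.map_eq_none_iff] at h
      intro x hx
      rcases List.mem_cons.mp hx with h1 | h1
      · rw [h1]; exact hc
      · exact ih h x h1

theorem pv_findSpace_some (l : List Char) : ∀ (k : Nat), pvB_findSpace l = some k →
    (∀ c ∈ l.take k, c ≠ ' ') ∧ l.drop k = ' ' :: l.drop (k + 1) := by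
  induction l with
  | nil => intro k h; simp [pvB_findSpace] at h
  | cons c r ih =>
    intro k h
    by_cases hc : c = ' '
    · simp only [pvB_findSpace, if_pos hc, Option.some.injEq] at h
      subst h; subst hc; simp
    · simp only [pvB_findSpace, if_neg hc, Option.map_eq_some_iff] at h
      obtain ⟨k', hk', rfl⟩ := h
      obtain ⟨h1, h2⟩ := ih k' hk'
      constructor
      · intro x hx
        rcases List.mem_cons.mp (by simpa using hx) with h3 | h3
        · rw [h3]; exact hc
        · exact h1 x h3
      · simpa using h2

theorem pv_scanPlain_take (l : List Char) :
    ∀ c ∈ l.take (pvB_scanPlain l), ¬(c = '.' ∨ c = ' ' ∨ c = '\\') := by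
  induction l with
  | nil => simp
  | cons c r ih =>
    by_cases hc : c = '.' ∨ c = ' ' ∨ c = '\\'
    · simp [pvB_scanPlain, hc]
    · simp only [pvB_scanPlain, if_neg hc, List.take_succ_cons]
      intro x hx
      rcases List.mem_cons.mp hx with h1 | h1
      · rw [h1]; exact hc
      · exact ih x h1

theorem pv_okP_split (l : List Char) (h : pvOk l PvSt.P = true) :
    l.drop (pvB_scanPlain l) = [] ∨
      ∃ r2, l.drop (pvB_scanPlain l) = '.' :: r2 ∧ pvOk r2 PvSt.B = true := by
  induction l with
  | nil => left; simp
  | cons c r ih =>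
    by_cases hdot : c = '.'
    · right
      refine ⟨r, ?_, ?_⟩
      · simp [pvB_scanPlain, hdot]
      · simpa [pvOk, hdot] using h
    · by_cases hbs : c = '\\'
      · simp [pvOk, hdot, hbs] at h
      · by_cases hsp : c = ' '
        · simp [pvOk, hdot, hbs, hsp] at h
        · have hr : pvOk r PvSt.P = true := by simpa [pvOk, hdot, hbs, hsp] using h
          have hsc : pvB_scanPlain (c :: r) = pvB_scanPlain r + 1 := by
            simp only [pvB_scanPlain]; rw [if_neg (by push Not; exact ⟨hdot, hsp, hbs⟩)]
          rw [hsc, List.drop_succ_cons]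
          exact ih hr

theorem pv_okE_split (l : List Char) (h : pvOk l PvSt.E = true) :
    pvB_findSpace l = none ∨
      ∃ k, pvB_findSpace l = some k ∧ pvOk (l.drop (k + 1)) PvSt.P = true := by
  induction l with
  | nil => left; rfl
  | cons c r ih =>
    by_cases hc : c = ' '
    · right
      refine ⟨0, by simp [pvB_findSpace, hc], ?_⟩
      simpa [pvOk, hc] using h
    · have hr : pvOk r PvSt.E = true := by simpa [pvOk, hc] using h
      rcases ih hr with h1 | ⟨k, h1, h2⟩
      · left; simp [pvB_findSpace, hc, h1]
      · right
        exact ⟨k + 1, by simp [pvB_findSpace, hc, h1], by simpa using h2⟩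

theorem pv_base (ret : List String) (last : Option Char) (bdy : Bool) :
    pvA_loop [] ret [] last false = pvB_loop [] bdy ret := by
  have h : PySem.Str.stripChars (String.ofList []) " " = "" := rfl
  simp [pvA_loop, pvB_loop, h]

theorem pv_main : ∀ (n : Nat) (rest : List Char), rest.length ≤ n →
    ∀ (ret : List String) (last : Option Char) (bdy : Bool),
    (bdy = true → last = none ∨ last = some '.') →
    (bdy = false → last = some ' ') →
    pvOk rest (if bdy then PvSt.B else PvSt.P) = true →
    pvA_loop rest ret [] last false = pvB_loop rest bdy ret := by
  intro n
  induction n with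
  | zero =>
    intro rest hlen ret last bdy _ _ _
    have h0 : rest = [] := List.eq_nil_of_length_eq_zero (Nat.le_zero.mp hlen)
    subst h0
    exact pv_base ret last bdy
  | succ n ih =>
    intro rest hlen ret last bdy hbt hbf hok
    match rest with
    | [] => exact pv_base ret last bdy
    | c :: r =>
      have hlen' : r.length ≤ n := by simpa using hlen
      by_cases hdot : c = '.'
      · -- both sides consume the dot and return to a boundary
        subst hdot
        have hokB : pvOk r PvSt.B = true := by
          cases bdy
          · simpa [pvOk] using hok
          · simpa [pvOk] using hok
        have hA : pvA_loop ('.' :: r) ret [] last false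
            = pvA_loop r ret [] (some '.') false := by
          simp [pvA_loop]
        rw [hA]
        have hB : pvB_loop ('.' :: r) bdy ret = pvB_loop r true ret := by
          simp [pvB_loop]
        rw [hB]
        exact ih r hlen' ret (some '.') true (fun _ => Or.inr rfl) (by simp) hokB
      · by_cases hbs : c = '\\'
        · -- an escaped name: A walks it char by char, B jumps to the space
          subst hbs
          cases bdy
          · simp [pvOk, hdot] at hok
          · have hokE : pvOk r PvSt.E = true := by simpa [pvOk, hdot] using hok
            have hA : pvA_loop ('\\' :: r) ret [] last false
                = pvA_loop r ret ['\\'] (some '\\') true := by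
              rcases hbt rfl with h | h <;> simp [pvA_loop, h]
            rw [hA]
            rcases pv_okE_split r hokE with hfs | ⟨k, hfs, hokP⟩
            · -- no space: the whole rest is one escaped part, both emit it at the end
              have hw := pv_A_esc_walk r (pv_findSpace_none r hfs) [] ret ['\\'] (some '\\')
              rw [List.append_nil] at hw
              rw [hw]
              have hne := pv_strip_ne ('\\' :: r) '\\' (by simp) (by decide)
              simp [pvA_loop, pvB_loop, pvB_findSpace, hfs, hne]
            · -- space at index k of r: the part is '\' + r[:k] + ' '
              obtain ⟨hnos, hdropk⟩ := pv_findSpace_some r k hfs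
              have hrsplit : r.take k ++ (' ' :: r.drop (k + 1)) = r := by
                rw [← hdropk, List.take_append_drop]
              have hw := pv_A_esc_walk (r.take k) hnos (' ' :: r.drop (k + 1)) ret ['\\'] (some '\\')
              rw [hrsplit] at hw
              rw [hw]
              have htake : r.take (k + 1) = r.take k ++ [' '] := by
                have hgk : r[k]? = some ' ' := by
                  rw [← List.head?_drop, hdropk]; rfl
                rw [List.take_add_one, hgk]; rfl
              have hA2 : pvA_loop (' ' :: r.drop (k + 1)) ret ('\\' :: r.take k)
                    ((r.take k).foldl (fun _ c => some c) (some '\\')) true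
                  = pvA_loop (r.drop (k + 1))
                      (ret ++ [String.ofList ('\\' :: (r.take k ++ [' ']))]) [] (some ' ') false := by
                have h1 : (" ").toList = [' '] := rfl
                have hone : String.ofList ('\\' :: (r.take k ++ [' '])) ≠ " " := by
                  rw [Ne, pv_ofList_eq_iff, h1]; simp
                simp [pvA_loop, hone]
              simp only [List.singleton_append]
              rw [hA2]
              have hB : pvB_loop ('\\' :: r) true ret
                  = pvB_loop (r.drop (k + 1)) false
                      (ret ++ [String.ofList ('\\' :: (r.take k ++ [' ']))]) := by
                simp [pvB_loop, pvB_findSpace, hfs, htake]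
              rw [hB]
              exact ih (r.drop (k + 1)) (le_trans (by simp) hlen') _ (some ' ') false
                (by simp) (fun _ => rfl) (by simpa using hokP)
        · by_cases hsp : c = ' '
          · -- a space outside an escaped name always raises: excluded by pvOk
            exfalso
            cases bdy
            · simp [pvOk, hdot, hbs, hsp] at hok
            · simp [pvOk, hdot, hbs, hsp] at hok
          · -- a plain name: A appends char by char, B takes the whole prefix up to the dot
            have hokP : pvOk r PvSt.P = true := by
              cases bdy
              · simpa [pvOk, hdot, hbs, hsp] using hok
              · simpa [pvOk, hdot, hbs, hsp] using hok
            have hplain : ∀ x ∈ c :: r.take (pvB_scanPlain r), ¬(x = '.' ∨ x = ' ' ∨ x = '\\') := by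
              intro x hx
              rcases List.mem_cons.mp hx with h1 | h1
              · rw [h1]; push Not; exact ⟨hdot, hsp, hbs⟩
              · exact pv_scanPlain_take r x h1
            have hsc : pvB_scanPlain (c :: r) = pvB_scanPlain r + 1 := by
              simp only [pvB_scanPlain]; rw [if_neg (by push Not; exact ⟨hdot, hsp, hbs⟩)]
            have hsplit : (c :: r.take (pvB_scanPlain r)) ++ r.drop (pvB_scanPlain r) = c :: r := by
              simp [List.take_append_drop]
            have hw := pv_A_plain_walk (c :: r.take (pvB_scanPlain r)) hplain
              (r.drop (pvB_scanPlain r)) ret [] last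
            rw [hsplit, List.nil_append] at hw
            rw [hw]
            rcases pv_okP_split r hokP with hnil | ⟨r2, hr2, hokB⟩
            · -- plain name runs to the end of the path
              have hne := pv_strip_ne (c :: r.take (pvB_scanPlain r)) c (by simp) hsp
              have hdc : (c :: r).drop (pvB_scanPlain r + 1) = [] := by
                rw [List.drop_succ_cons]; exact hnil
              have hnone : (c :: r)[pvB_scanPlain r + 1]? = none := by
                rw [← List.head?_drop, hdc]; rfl
              simp [pvA_loop, pvB_loop, hdot, hbs, hsp, hne, hnil, hsc, hdc, hnone]
            · -- plain name ends at a dot; both continue at a boundary after it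
              have hA2 : pvA_loop ('.' :: r2) ret (c :: r.take (pvB_scanPlain r))
                    ((c :: r.take (pvB_scanPlain r)).foldl (fun _ c => some c) last) false
                  = pvA_loop r2 (ret ++ [String.ofList (c :: r.take (pvB_scanPlain r))])
                      [] (some '.') false := by
                simp [pvA_loop]
              rw [hr2, hA2]
              have hB : pvB_loop (c :: r) bdy ret
                  = pvB_loop r2 true (ret ++ [String.ofList (c :: r.take (pvB_scanPlain r))]) := by
                have hdc : (c :: r).drop (pvB_scanPlain r + 1) = '.' :: r2 := by
                  rw [List.drop_succ_cons]; exact hr2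
                have hsome : (c :: r)[pvB_scanPlain r + 1]? = some '.' := by
                  rw [← List.head?_drop, hdc]; rfl
                simp [pvB_loop, hdot, hbs, hsp, hsc, hdc, hsome]
              rw [hB]
              have hlen2 : r2.length ≤ n := by
                have h6 : (r.drop (pvB_scanPlain r)).length ≤ r.length := by simp
                rw [hr2] at h6
                simp only [List.length_cons] at h6
                omega
              exact ih r2 hlen2 _ (some '.') true (fun _ => Or.inr rfl) (by simp) hokB

-- ===== VERDICT (by name: the statement is the Claim_ definition above) =====
theorem escaped_verilog_hierarchy_path_split_spec : Claim_equal_escaped_verilog_hierarchy_path_split := by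
  intro s _ hpre
  unfold Spec_escaped_verilog_hierarchy_path_split
  unfold escaped_verilog_hierarchy_path_split escaped_verilog_hierarchy_path_split_alt
  rw [pv_main s.toList.length s.toList le_rfl [] none true (fun _ => Or.inl rfl) (fun h => by cases h) hpre]
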